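-- pv_equiv track=rewrite | github.com/Alisaxq/CAN_server | can_file_serve.py | record_file_name
-- ===== SOURCE A (Python) =====
-- def record_file_name(msg):
--     ch = []
--     for i in msg:
--         if i == 0:
--             ch.append(' ')
--             return ''.join(ch)
--         else:
--             ch.append(chr(i))
--     return ''.join(ch)
-- ===== SOURCE B (Python) =====
-- def record_file_name(msg):
--     try:
--         idx = msg.index(0)
--     except ValueError:
--         return ''.join(chr(b) for b in msg)
--     return ''.join(chr(b) for b in msg[:idx]) + ' '
-- ===== Notes on version B (the rewrite author's own statement) =====
-- stated objective: idiomatic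
-- what changed: B locates the terminator once with list.index inside try/except and then slices and maps, instead of A's single interleaved scan-and-emit loop with an accumulator and mid-loop return.
import Mathlib
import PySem

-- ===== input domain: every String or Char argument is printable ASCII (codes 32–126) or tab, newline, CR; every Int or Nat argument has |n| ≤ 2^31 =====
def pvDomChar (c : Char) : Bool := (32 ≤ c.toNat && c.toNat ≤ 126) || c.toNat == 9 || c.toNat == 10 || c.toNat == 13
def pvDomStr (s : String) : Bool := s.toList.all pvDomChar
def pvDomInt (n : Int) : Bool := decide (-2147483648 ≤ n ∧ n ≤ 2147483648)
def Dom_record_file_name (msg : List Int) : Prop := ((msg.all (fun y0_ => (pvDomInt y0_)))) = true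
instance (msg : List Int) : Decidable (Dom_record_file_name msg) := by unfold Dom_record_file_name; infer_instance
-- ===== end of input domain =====

-- B replaces A's interleaved scan-and-emit loop by locate-the-terminator-then-slice-and-map (idiomatic; same cost).

-- chr(i): exact for 0 ≤ i < 0x110000 excluding surrogates (guaranteed by Pre_)
def pvChr (i : Int) : Char := Char.ofNat i.toNat

-- ===== PORT A =====
def pvRecA : List Int → List Char → String
  | [], ch => String.ofList ch
  | i :: rest, ch =>
      if i = 0 then String.ofList (ch ++ [' '])
      else pvRecA rest (ch ++ [pvChr i])

def record_file_name (msg : List Int) : String := pvRecA msg []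

-- ===== PORT B =====
def record_file_name_alt (msg : List Int) : String :=
  match PySem.List.index? msg 0 with
  | none => String.ofList (msg.map pvChr)
  | some idx => String.ofList ((PySem.List.slice msg none (some (idx : Int))).map pvChr) ++ " "

-- ===== PRECONDITION & SPEC =====
-- Pre_ excludes inputs where chr raises ValueError (a code point before the first 0 that is
-- negative or ≥ 0x110000), and additionally excludes surrogate code points (U+D800–U+DFFF)
-- before the first 0, on which both Pythons return a string that is not representable as a Lean String.
def Pre_record_file_name (msg : List Int) : Prop :=
  ∀ i ∈ msg.takeWhile (fun i => i != 0), 0 ≤ i ∧ i < 1114112 ∧ ¬(55296 ≤ i ∧ i < 57344)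
instance (msg : List Int) : Decidable (Pre_record_file_name msg) := by unfold Pre_record_file_name; infer_instance
def pvWitness_record_file_name : List Int := [72, 105, 0, 99]

def Spec_record_file_name (msg : List Int) (out : String) : Prop := out = record_file_name_alt msg
instance (msg : List Int) (out : String) : Decidable (Spec_record_file_name msg out) := by unfold Spec_record_file_name; infer_instance

-- ===== CLAIM (what is proved, stated in full; the proofs are below) =====
def Claim_equal_record_file_name : Prop := ∀ (msg : List Int), Dom_record_file_name msg → Pre_record_file_name msg → Spec_record_file_name msg (record_file_name msg)

-- ===== LEMMAS AND PROOFS =====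
lemma pvRecA_char :
    ∀ (msg : List Int) (ch : List Char),
      pvRecA msg ch =
        match PySem.List.index? msg 0 with
        | none => String.ofList (ch ++ msg.map pvChr)
        | some idx => String.ofList ((ch ++ (msg.take idx).map pvChr) ++ [' ']) := by
  intro msg
  induction msg with
  | nil => intro ch; simp [pvRecA, PySem.List.index?]
  | cons i rest ih =>
    intro ch
    by_cases hi : i = 0
    · subst hi
      rw [PySem.List.index?_cons_self]
      simp [pvRecA]
    · rw [PySem.List.index?_cons_of_ne rest hi]
      simp only [pvRecA, if_neg hi, ih]
      cases h : PySem.List.index? rest 0 with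
      | none => simp
      | some k => simp [List.take_succ_cons]

-- ===== VERDICT (by name: the statement is the Claim_ definition above) =====
theorem record_file_name_spec : Claim_equal_record_file_name := by
  intro msg _ _
  unfold Spec_record_file_name record_file_name record_file_name_alt
  rw [pvRecA_char]
  cases h : PySem.List.index? msg 0 with
  | none => simp
  | some k =>
    dsimp only
    rw [PySem.List.slice_to_natCast msg k]
    simp
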